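-- pv_equiv track=rewrite | github.com/Forest48/HIC4-cypher | secret/encode.py | toNine
-- ===== SOURCE A (Python) =====
-- def toNine(ten):
--     nine = []
--     while ten:
--         nine.append(ten % 9)
--         ten = ten // 9
--     result = 0
--     i = len(nine) - 1
--     while i >= 0:
--         result = result * 10 + int(nine[i])
--         i-= 1
--     return result
-- ===== SOURCE B (Python) =====
-- def toNine(ten):
--     result = 0
--     power = 1
--     while ten:
--         result += (ten % 9) * power
--         power *= 10
--         ten //= 9
--     return result
-- ===== Notes on version B (the rewrite author's own statement) =====
-- stated objective: simpler
-- what changed: Single loop maintaining a running power-of-ten multiplier that adds each base-9 digit's decimal-place contribution directly, instead of building a digit list and re-scanning it in reverse.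
import Mathlib
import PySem

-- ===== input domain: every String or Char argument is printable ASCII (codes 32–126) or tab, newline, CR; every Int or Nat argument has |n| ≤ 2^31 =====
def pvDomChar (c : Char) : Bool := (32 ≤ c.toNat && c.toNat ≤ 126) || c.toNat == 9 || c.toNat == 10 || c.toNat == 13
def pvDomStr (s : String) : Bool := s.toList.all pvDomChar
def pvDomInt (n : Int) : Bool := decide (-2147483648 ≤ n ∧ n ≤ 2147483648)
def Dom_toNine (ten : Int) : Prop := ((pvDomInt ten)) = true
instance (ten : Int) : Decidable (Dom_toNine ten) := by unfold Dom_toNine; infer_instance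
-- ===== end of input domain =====

-- B changes the algorithm only (single loop with a power-of-ten multiplier, no digit list);
-- on negative inputs both Pythons loop forever; the ports' 0 < ten guards make both total identically there.

-- ===== PORT A =====
-- first while loop of A: collect base-9 digits (append order); the 0 < ten guard only
-- makes the recursion total — Python loops forever on negative ten, excluded by Pre_.
def toNineDigits (ten : Int) : List Int :=
  if h : 0 < ten then
    PySem.Int.mod ten 9 :: toNineDigits (PySem.Int.floordiv ten 9)
  else []
termination_by ten.toNat
decreasing_by
  have h9 : PySem.Int.floordiv ten 9 = ten / 9 := PySem.Int.floordiv_eq_ediv_of_pos (by omega)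
  rw [h9]; omega

-- second while loop of A: scan the digit list from the last index down, result = result*10 + digit
def toNineScan (nine : List Int) : Int :=
  nine.reverse.foldl (fun result d => result * 10 + d) 0

def toNine (ten : Int) : Int := toNineScan (toNineDigits ten)

-- ===== PORT B =====
def toNineAltLoop (ten result power : Int) : Int :=
  if h : 0 < ten then
    toNineAltLoop (PySem.Int.floordiv ten 9) (result + PySem.Int.mod ten 9 * power) (power * 10)
  else result
termination_by ten.toNat
decreasing_by
  have h9 : PySem.Int.floordiv ten 9 = ten / 9 := PySem.Int.floordiv_eq_ediv_of_pos (by omega)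
  rw [h9]; omega

def toNine_alt (ten : Int) : Int := toNineAltLoop ten 0 1

-- ===== PRECONDITION & SPEC =====
def Spec_toNine (ten : Int) (out : Int) : Prop := out = toNine_alt ten
instance (ten : Int) (out : Int) : Decidable (Spec_toNine ten out) := by unfold Spec_toNine; infer_instance

-- ===== CLAIM (what is proved, stated in full; the proofs are below) =====
def Claim_equal_toNine : Prop := ∀ (ten : Int), Dom_toNine ten → Spec_toNine ten (toNine ten)

-- ===== LEMMAS AND PROOFS =====

theorem toNineScan_append (ds : List Int) (d : Int) :
    toNineScan (d :: ds) = toNineScan ds * 10 + d := by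
  simp [toNineScan, List.foldl_append]

theorem toNine_rec (ten : Int) (h : 0 < ten) :
    toNine ten = toNine (PySem.Int.floordiv ten 9) * 10 + PySem.Int.mod ten 9 := by
  rw [toNine, toNineDigits, dif_pos h, toNineScan_append]; rfl

theorem toNineAltLoop_eq (n : Nat) : ∀ (ten result power : Int), ten.toNat = n →
    toNineAltLoop ten result power = result + power * toNine ten := by
  induction n using Nat.strong_induction_on with
  | _ n ih =>
    intro ten result power hn
    rw [toNineAltLoop]
    by_cases h : 0 < ten
    · rw [dif_pos h]
      have h9 : PySem.Int.floordiv ten 9 = ten / 9 := PySem.Int.floordiv_eq_ediv_of_pos (by omega)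
      have hlt : (PySem.Int.floordiv ten 9).toNat < n := by rw [h9]; omega
      rw [ih _ hlt _ _ _ rfl, toNine_rec ten h]
      ring
    · rw [dif_neg h, toNine, toNineDigits, dif_neg h]
      simp [toNineScan]

-- ===== VERDICT (by name: the statement is the Claim_ definition above) =====
theorem toNine_spec : Claim_equal_toNine := by
  intro ten _
  show toNine ten = toNine_alt ten
  rw [toNine_alt, toNineAltLoop_eq ten.toNat ten 0 1 rfl]
  ring
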